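-- pv_equiv track=rewrite | github.com/Umuzi-org/Keabetswe-Kolobe-Level-0-Coding-Challenges | task0.9.py | vowels_in_word
-- ===== SOURCE A (Python) =====
-- def vowels_in_word(word):
--     vowels = ['a', 'e', 'i', 'o', 'u']
--     lower_case_word = word.lower()
--     result = ''
--     for letter in lower_case_word:
--         if letter in vowels and letter not in result:
--             result += letter + ', '
--     return 'Vowels: ' + result[:-2]
-- ===== SOURCE B (Python) =====
-- def vowels_in_word(word):
--     lw = word.lower()
--     pairs = sorted(((lw.index(v), v) for v in 'aeiou' if v in lw),
--                    key=lambda p: p[0])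
--     return 'Vowels: ' + ', '.join(v for _, v in pairs)
-- ===== Notes on version B (the rewrite author's own statement) =====
-- stated objective: faster
-- what changed: Instead of a per-character Python scan accumulating unseen vowels, B indexes each of the five vowels once in the lowered word, sorts the (first_index, vowel) pairs by index and joins the vowels.
import Mathlib
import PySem

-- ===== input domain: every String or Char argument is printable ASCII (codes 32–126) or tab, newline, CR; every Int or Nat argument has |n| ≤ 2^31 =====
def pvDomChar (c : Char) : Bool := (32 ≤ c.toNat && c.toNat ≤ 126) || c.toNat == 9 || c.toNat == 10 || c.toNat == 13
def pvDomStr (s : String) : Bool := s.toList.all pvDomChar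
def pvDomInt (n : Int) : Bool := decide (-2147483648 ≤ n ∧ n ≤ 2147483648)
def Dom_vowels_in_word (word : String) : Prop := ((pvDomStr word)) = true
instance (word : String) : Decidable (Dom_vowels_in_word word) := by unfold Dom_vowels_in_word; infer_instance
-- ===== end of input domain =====

-- B lists each vowel's first index in the lowered word, sorts the (index, vowel) pairs and joins; A scans once accumulating unseen vowels.

-- ===== PORT A =====
def vowels_in_word (word : String) : String :=
  let vowels : List Char := ['a', 'e', 'i', 'o', 'u']
  let lower_case_word := PySem.Chars.lower word.toList
  let result := lower_case_word.foldl
    (fun acc letter => if letter ∈ vowels ∧ letter ∉ acc then acc ++ [letter, ',', ' '] else acc)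
    ([] : List Char)
  String.ofList ("Vowels: ".toList ++ PySem.List.slice result none (some (-2)))

-- ===== PORT B =====
def vowels_in_word_alt (word : String) : String :=
  let lw := PySem.Chars.lower word.toList
  -- lw.index(v) is guarded by 'v in lw', so the Option is always some; getD 0 is exact here
  let pairs := (['a', 'e', 'i', 'o', 'u'].filter (fun v => v ∈ lw)).map
    (fun v => ((PySem.List.index? lw v).getD 0, v))
  let sp := PySem.List.sorted pairs Prod.fst false
  String.ofList ("Vowels: ".toList ++ PySem.Chars.join [',', ' '] (sp.map (fun p => [p.2])))

-- ===== PRECONDITION & SPEC =====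
def Spec_vowels_in_word (word : String) (out : String) : Prop := out = vowels_in_word_alt word
instance (word : String) (out : String) : Decidable (Spec_vowels_in_word word out) := by unfold Spec_vowels_in_word; infer_instance

-- ===== CLAIM (what is proved, stated in full; the proofs are below) =====
def Claim_equal_vowels_in_word : Prop := ∀ (word : String), Dom_vowels_in_word word → Spec_vowels_in_word word (vowels_in_word word)

-- ===== LEMMAS AND PROOFS =====

def pvVowels : List Char := ['a', 'e', 'i', 'o', 'u']

def pvStep (vs : List Char) (c : Char) : List Char :=
  if c ∈ pvVowels ∧ c ∉ vs then vs ++ [c] else vs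

def pvFlat (vs : List Char) : List Char := vs.flatMap (fun v => [v, ',', ' '])

lemma pvStep_pos {vs : List Char} {c : Char} (h : c ∈ pvVowels ∧ c ∉ vs) :
    pvStep vs c = vs ++ [c] := by unfold pvStep; rw [if_pos h]

lemma pvStep_neg {vs : List Char} {c : Char} (h : ¬(c ∈ pvVowels ∧ c ∉ vs)) :
    pvStep vs c = vs := by unfold pvStep; rw [if_neg h]

lemma pvMem_flat {c : Char} (hc : c ∈ pvVowels) (vs : List Char) :
    c ∈ pvFlat vs ↔ c ∈ vs := by
  have h1 : c ≠ ',' := by revert hc; simp [pvVowels]; rintro (rfl|rfl|rfl|rfl|rfl) <;> decide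
  have h2 : c ≠ ' ' := by revert hc; simp [pvVowels]; rintro (rfl|rfl|rfl|rfl|rfl) <;> decide
  simp [pvFlat, h1, h2]

lemma pvStep_flat (vs : List Char) (c : Char) :
    (if c ∈ pvVowels ∧ c ∉ pvFlat vs then pvFlat vs ++ [c, ',', ' '] else pvFlat vs)
      = pvFlat (pvStep vs c) := by
  by_cases hv : c ∈ pvVowels
  · by_cases hm : c ∈ vs
    · rw [if_neg (fun hc => hc.2 ((pvMem_flat hv vs).mpr hm)), pvStep_neg (fun hc => hc.2 hm)]
    · have hnm : c ∉ pvFlat vs := fun hin => hm ((pvMem_flat hv vs).mp hin)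
      rw [if_pos ⟨hv, hnm⟩, pvStep_pos ⟨hv, hm⟩]
      simp [pvFlat]
  · rw [if_neg (fun hc => hv hc.1), pvStep_neg (fun hc => hv hc.1)]

lemma pvFold_flat (L : List Char) (vs : List Char) :
    L.foldl (fun acc letter =>
        if letter ∈ pvVowels ∧ letter ∉ acc then acc ++ [letter, ',', ' '] else acc)
      (pvFlat vs) = pvFlat (L.foldl pvStep vs) := by
  induction L generalizing vs with
  | nil => rfl
  | cons c L ih =>
    rw [List.foldl_cons, List.foldl_cons, pvStep_flat vs c]
    exact ih (pvStep vs c)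

lemma pvTake_flat (vs : List Char) :
    (pvFlat vs).take ((pvFlat vs).length - 2)
      = PySem.Chars.join [',', ' '] (vs.map (fun v => [v])) := by
  induction vs with
  | nil => simp [pvFlat, PySem.Chars.join_nil]
  | cons v vs ih =>
    cases vs with
    | nil => simp [pvFlat, PySem.Chars.join_singleton]
    | cons w ws =>
      have hlen2 : (pvFlat (w :: ws)).length = 3 * (ws.length + 1) := by
        simp [pvFlat, List.length_flatMap]; ring
      have hexp : pvFlat (v :: w :: ws) = v :: ',' :: ' ' :: pvFlat (w :: ws) := by
        simp [pvFlat]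
      rw [hexp]
      simp only [List.length_cons]
      rw [show (pvFlat (w::ws)).length + 1 + 1 + 1 - 2 = 3 + ((pvFlat (w :: ws)).length - 2) by
        rw [hlen2]; omega]
      rw [List.take_add]
      simp only [List.take_succ_cons, List.take_zero, List.drop_succ_cons, List.drop_zero]
      have ih' : List.take ((pvFlat (w :: ws)).length - 2) (pvFlat (w :: ws))
          = PySem.Chars.join [',', ' '] ([w] :: ws.map (fun v => [v])) := by
        simpa using ih
      rw [List.map_cons, List.map_cons, PySem.Chars.join_cons_cons, ih']
      rfl

lemma pvIdx_lt {L : List Char} {v : Char} (hv : v ∈ L) :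
    (PySem.List.index? L v).getD 0 < L.length := by
  rcases Option.isSome_iff_exists.mp ((PySem.List.index?_isSome_iff L v).mpr hv) with ⟨k, hk⟩
  rcases PySem.List.getElem_of_index?_eq_some hk with ⟨hlt, _, _⟩
  rw [hk]; simpa using hlt

-- the fold-result's invariant: nodup, membership, and strictly increasing first indices
lemma pvFold_inv (L : List Char) :
    (L.foldl pvStep []).Nodup
    ∧ (∀ v, v ∈ L.foldl pvStep [] ↔ v ∈ pvVowels ∧ v ∈ L)
    ∧ (L.foldl pvStep []).Pairwise
        (fun a b => (PySem.List.index? L a).getD 0 < (PySem.List.index? L b).getD 0) := by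
  induction L using List.reverseRecOn with
  | nil => simp
  | append_singleton L c ih =>
    obtain ⟨hnd, hmem, hpw⟩ := ih
    rw [List.foldl_append, List.foldl_cons, List.foldl_nil]
    have hidx : ∀ v ∈ L.foldl pvStep [], PySem.List.index? (L ++ [c]) v = PySem.List.index? L v := by
      intro v hv
      exact PySem.List.index?_append_of_mem _ ((hmem v).mp hv).2
    by_cases h : c ∈ pvVowels ∧ c ∉ L.foldl pvStep []
    · have hcL : c ∉ L := fun hc => h.2 ((hmem c).mpr ⟨h.1, hc⟩)
      have hcidx : PySem.List.index? (L ++ [c]) c = some L.length :=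
        PySem.List.index?_append_singleton_self L c hcL
      have hres : pvStep (L.foldl pvStep []) c = L.foldl pvStep [] ++ [c] := pvStep_pos h
      rw [hres]
      refine ⟨?_, ?_, ?_⟩
      · refine List.Nodup.append hnd (List.nodup_singleton c) ?_
        intro a ha hb
        simp only [List.mem_singleton] at hb
        exact h.2 (hb ▸ ha)
      · intro v
        rw [List.mem_append, List.mem_singleton, hmem, List.mem_append, List.mem_singleton]
        constructor
        · rintro (⟨h1, h2⟩ | rfl)
          · exact ⟨h1, Or.inl h2⟩
          · exact ⟨h.1, Or.inr rfl⟩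
        · rintro ⟨h1, h2 | rfl⟩
          · exact Or.inl ⟨h1, h2⟩
          · exact Or.inr rfl
      · rw [List.pairwise_append]
        refine ⟨hpw.imp_of_mem (fun ha hb hlt => by rw [hidx _ ha, hidx _ hb]; exact hlt),
          List.pairwise_singleton _ _, ?_⟩
        intro a ha b hb
        rw [List.mem_singleton] at hb
        subst hb
        rw [hidx a ha, hcidx]
        simpa using pvIdx_lt ((hmem a).mp ha).2
    · have hres : pvStep (L.foldl pvStep []) c = L.foldl pvStep [] := pvStep_neg h
      rw [hres]
      refine ⟨hnd, ?_, ?_⟩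
      · intro v
        rw [hmem]
        constructor
        · rintro ⟨h1, h2⟩; exact ⟨h1, List.mem_append_left _ h2⟩
        · rintro ⟨h1, h2⟩
          rcases List.mem_append.mp h2 with h2 | h2
          · exact ⟨h1, h2⟩
          · have hvc : v = c := by simpa using h2
            subst hvc
            have hin : v ∈ L.foldl pvStep [] := by
              by_contra hnf
              exact h ⟨h1, hnf⟩
            exact ⟨h1, ((hmem v).mp hin).2⟩
      · exact hpw.imp_of_mem (fun ha hb h => by rw [hidx _ ha, hidx _ hb]; exact h)

lemma pvSorted_eq (L : List Char) :
    PySem.List.sorted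
      ((pvVowels.filter (fun v => decide (v ∈ L))).map
        (fun v => ((PySem.List.index? L v).getD 0, v)))
      Prod.fst false
    = (L.foldl pvStep []).map (fun v => ((PySem.List.index? L v).getD 0, v)) := by
  obtain ⟨hnd, hmem, hpw⟩ := pvFold_inv L
  set f : Char → Nat × Char := fun v => ((PySem.List.index? L v).getD 0, v) with hf
  apply PySem.List.sorted_eq_of_perm_of_pairwise_lt
  · apply List.Perm.map f
    refine (List.perm_ext_iff_of_nodup hnd ?_).mpr ?_
    · exact List.Nodup.filter _ (by decide)
    · intro v
      rw [hmem v]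
      simp
  · refine List.Pairwise.map f ?_ hpw
    intro a b hab
    exact hab

lemma pvFold_flat' (L : List Char) :
    L.foldl (fun acc letter =>
        if letter ∈ pvVowels ∧ letter ∉ acc then acc ++ [letter, ',', ' '] else acc) []
      = pvFlat (L.foldl pvStep []) := pvFold_flat L []

lemma pvMain (L : List Char) :
    "Vowels: ".toList ++ PySem.List.slice
      (L.foldl (fun acc letter =>
        if letter ∈ pvVowels ∧ letter ∉ acc then acc ++ [letter, ',', ' '] else acc) [])
      none (some (-2))
    = "Vowels: ".toList ++ PySem.Chars.join [',', ' ']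
        ((PySem.List.sorted
          ((pvVowels.filter (fun v => decide (v ∈ L))).map
            (fun v => ((PySem.List.index? L v).getD 0, v)))
          Prod.fst false).map (fun p => [p.2])) := by
  congr 1
  rw [pvFold_flat' L]
  rw [PySem.List.slice_to_neg_ofNat _ 2 (by omega)]
  rw [pvTake_flat]
  rw [pvSorted_eq, List.map_map]
  rfl

-- ===== VERDICT (by name: the statement is the Claim_ definition above) =====
theorem vowels_in_word_spec : Claim_equal_vowels_in_word := by
  intro word _
  show vowels_in_word word = vowels_in_word_alt word
  unfold vowels_in_word vowels_in_word_alt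
  exact congrArg String.ofList (pvMain (PySem.Chars.lower word.toList))
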